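-- pv_equiv track=rewrite | github.com/sharonrye/trim | move_measure20.py | page_label
-- ===== SOURCE A (Python) =====
-- def page_label(points, key='page_id', row_separation=100):
--     points = sorted(points, key=lambda x: x[1], reverse=True)
--     split = []
--     prev = 0
--     for i in range(len(points) - 1):
--         if abs(points[i][1] - points[i + 1][1]) > row_separation:
--             split.append(points[prev:i + 1])
--             prev = i + 1
--     split.append(points[prev:])
--     for i in range(len(split)):
--         split[i] = sorted(split[i], key=lambda x: x[0])
--     labeled = {}
--     counter = 0
--     for row in split:
--         for point in row:
--             if key == 'page_id':
--                 labeled[counter] = point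
--             if key == 'bus_id':
--                 labeled[point[2]] = point
--             counter = counter + 1
--     return labeled
-- ===== SOURCE B (Python) =====
-- def page_label(points, key='page_id', row_separation=100):
--     ordered = sorted(points, key=lambda p: p[1], reverse=True)
--     tagged = []
--     row = 0
--     prev_y = None
--     for p in ordered:
--         if prev_y is not None and abs(prev_y - p[1]) > row_separation:
--             row = row + 1
--         tagged.append((row, p))
--         prev_y = p[1]
--     tagged.sort(key=lambda t: (t[0], t[1][0]))
--     labeled = {}
--     for counter, (_, p) in enumerate(tagged):
--         if key == 'page_id':
--             labeled[counter] = p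
--         if key == 'bus_id':
--             labeled[p[2]] = p
--     return labeled
-- ===== Notes on version B (the rewrite author's own statement) =====
-- stated objective: alternative
-- what changed: Replaces A's index-loop slicing into rows, per-row sorts and nested row/point dict loop by a single row-tagging pass over the y-sorted points, one stable sort by the composite key (row, x), and one flat enumerate pass building the dict.
import Mathlib
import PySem

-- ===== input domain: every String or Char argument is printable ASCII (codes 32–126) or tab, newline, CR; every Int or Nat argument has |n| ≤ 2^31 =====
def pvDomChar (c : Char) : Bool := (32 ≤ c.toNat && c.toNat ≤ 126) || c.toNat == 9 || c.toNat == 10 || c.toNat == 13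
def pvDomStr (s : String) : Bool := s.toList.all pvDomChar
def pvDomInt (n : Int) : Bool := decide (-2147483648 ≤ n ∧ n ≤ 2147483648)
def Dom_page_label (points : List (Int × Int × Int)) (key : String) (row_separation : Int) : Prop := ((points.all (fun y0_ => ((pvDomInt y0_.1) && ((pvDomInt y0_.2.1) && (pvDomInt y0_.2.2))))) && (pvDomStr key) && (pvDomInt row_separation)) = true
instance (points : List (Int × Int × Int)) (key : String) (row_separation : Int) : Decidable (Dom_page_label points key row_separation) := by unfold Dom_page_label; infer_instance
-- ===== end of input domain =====

-- B replaces A's slice-based row splitting + per-row sorts + nested dict loop by a single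
-- row-tagging pass, one stable composite-key sort, and one enumerate pass (alternative decomposition, same cost).


-- ===== PORT A =====
def page_label (points : List (Int × Int × Int)) (key : String) (row_separation : Int) : List (Int × Int × Int × Int) :=
  let pts := PySem.List.sorted points (fun x => x.2.1) true
  let st := (PySem.List.pyRange 0 ((pts.length : Int) - 1) 1).foldl
    (fun (st : List (List (Int × Int × Int)) × Int) i =>
      if |(PySem.List.pyGetD pts i (0,0,0)).2.1 - (PySem.List.pyGetD pts (i+1) (0,0,0)).2.1| > row_separation
      then (st.1 ++ [PySem.List.slice pts (some st.2) (some (i+1))], i + 1)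
      else st) ([], 0)
  let split := st.1 ++ [PySem.List.slice pts (some st.2) none]
  -- 'for i in range(len(split)): split[i] = sorted(split[i], key=lambda x: x[0])' replaces each entry in place
  let split := split.map (fun r => PySem.List.sorted r (fun x => x.1) false)
  let fin := split.foldl
    (fun (st : PySem.Dict Int (Int × Int × Int) × Int) row =>
      row.foldl (fun (st : PySem.Dict Int (Int × Int × Int) × Int) point =>
        let d1 := if key == "page_id" then st.1.insert st.2 point else st.1
        let d2 := if key == "bus_id" then d1.insert point.2.2 point else d1
        (d2, st.2 + 1)) st) (PySem.Dict.empty, 0)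
  fin.1.items

-- ===== PORT B =====
def page_label_alt (points : List (Int × Int × Int)) (key : String) (row_separation : Int) : List (Int × Int × Int × Int) :=
  let ordered := PySem.List.sorted points (fun p => p.2.1) true
  let tg := ordered.foldl
    (fun (st : List (Int × (Int × Int × Int)) × Int × Option Int) p =>
      let row := match st.2.2 with
        | some py => if |py - p.2.1| > row_separation then st.2.1 + 1 else st.2.1
        | none => st.2.1
      (st.1 ++ [(row, p)], row, some p.2.1)) ([], 0, none)
  let tagged := PySem.List.sorted2 tg.1 (fun t => t.1) (fun t => t.2.1) false
  ((PySem.List.enumerate tagged).foldl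
    (fun (d : PySem.Dict Int (Int × Int × Int)) ct =>
      let d1 := if key == "page_id" then d.insert ct.1 ct.2.2 else d
      if key == "bus_id" then d1.insert ct.2.2.2.2 ct.2.2 else d1) PySem.Dict.empty).items

-- ===== PRECONDITION & SPEC =====
def Spec_page_label (points : List (Int × Int × Int)) (key : String) (row_separation : Int) (out : List (Int × Int × Int × Int)) : Prop := out = page_label_alt points key row_separation
instance (points : List (Int × Int × Int)) (key : String) (row_separation : Int) (out : List (Int × Int × Int × Int)) : Decidable (Spec_page_label points key row_separation out) := by unfold Spec_page_label; infer_instance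

-- ===== CLAIM (what is proved, stated in full; the proofs are below) =====
def Claim_equal_page_label : Prop := ∀ (points : List (Int × Int × Int)) (key : String) (row_separation : Int), Dom_page_label points key row_separation → Spec_page_label points key row_separation (page_label points key row_separation)

-- ===== LEMMAS AND PROOFS =====

def pvCstep (sep : Int) (st : List (List (Int×Int×Int)) × List (Int×Int×Int)) (p : Int×Int×Int) :
    List (List (Int×Int×Int)) × List (Int×Int×Int) :=
  match st.2.getLast? with
  | none => (st.1, [p])
  | some q => if |q.2.1 - p.2.1| > sep then (st.1 ++ [st.2], [p]) else (st.1, st.2 ++ [p])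

def pvChunks (sep : Int) (l : List (Int×Int×Int)) : List (List (Int×Int×Int)) × List (Int×Int×Int) :=
  l.foldl (pvCstep sep) ([], [])

theorem pvChunks_snoc (sep : Int) (l : List (Int×Int×Int)) (p : Int×Int×Int) :
    pvChunks sep (l ++ [p]) = pvCstep sep (pvChunks sep l) p := by
  simp [pvChunks, List.foldl_append]

theorem pvChunks_flatten (sep : Int) (l : List (Int×Int×Int)) :
    (pvChunks sep l).1.flatten ++ (pvChunks sep l).2 = l := by
  induction l using List.reverseRecOn with
  | nil => simp [pvChunks]
  | append_singleton l p ih =>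
    rw [pvChunks_snoc]
    unfold pvCstep
    cases h : (pvChunks sep l).2.getLast? with
    | none =>
      have h2 : (pvChunks sep l).2 = [] := List.getLast?_eq_none_iff.mp h
      simp only []
      rw [h2] at ih; simp at ih
      simp [ih]
    | some q =>
      simp only []
      split_ifs with hg
      · simp only [List.flatten_append, List.flatten_cons, List.flatten_nil, List.append_nil, List.append_assoc]
        rw [← List.append_assoc, ih]
      · rw [← List.append_assoc, ih]

theorem pvChunks_open_getLast? (sep : Int) (l : List (Int×Int×Int)) :
    (pvChunks sep l).2.getLast? = l.getLast? := by
  induction l using List.reverseRecOn with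
  | nil => simp [pvChunks]
  | append_singleton l p ih =>
    rw [pvChunks_snoc]
    unfold pvCstep
    cases h : (pvChunks sep l).2.getLast? with
    | none => simp
    | some q => simp only []; split_ifs with hg <;> simp

theorem pvA_loop (sep : Int) (l : List (Int×Int×Int)) (m : Nat) (hm : m + 1 ≤ l.length) :
    (PySem.List.pyRange 0 (m : Int) 1).foldl
      (fun (st : List (List (Int×Int×Int)) × Int) i =>
        if |(PySem.List.pyGetD l i (0,0,0)).2.1 - (PySem.List.pyGetD l (i+1) (0,0,0)).2.1| > sep
        then (st.1 ++ [PySem.List.slice l (some st.2) (some (i+1))], i + 1)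
        else st) ([], 0)
    = ((pvChunks sep (l.take (m+1))).1, ((pvChunks sep (l.take (m+1))).1.flatten.length : Int)) := by
  induction m with
  | zero =>
    rw [PySem.List.pyRange_one_eq_nil (by norm_num)]
    obtain ⟨p, t, rfl⟩ : ∃ p t, l = p :: t := by
      cases l with
      | nil => simp at hm
      | cons p t => exact ⟨p, t, rfl⟩
    simp [pvChunks, pvCstep]
  | succ m ih =>
    have hm' : m + 1 ≤ l.length := by omega
    have hmlt : m < l.length := by omega
    have hm1lt : m + 1 < l.length := by omega
    -- abbreviations
    set c := pvChunks sep (l.take (m+1)) with hc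
    have hF1 := pvChunks_flatten sep (l.take (m+1))
    rw [← hc] at hF1
    set a := c.1.flatten.length with ha
    have hlen : a + c.2.length = m + 1 := by
      have := congrArg List.length hF1
      simpa [← ha, List.length_take, Nat.min_eq_left hm'] using this
    have hopen : c.2 = (l.drop a).take (m + 1 - a) := by
      have h1 : List.drop a (List.take (m + 1) l) = c.2 := by
        exact (by simpa [← ha, List.drop_left] using congrArg (List.drop a) hF1 : c.2 = _).symm
      rw [← h1, List.drop_take]
    have hlast : c.2.getLast? = some l[m] := by
      rw [hc, pvChunks_open_getLast?]
      rw [List.getLast?_eq_getElem?]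
      simp [List.length_take, hmlt]
    -- split the range
    have hrange : PySem.List.pyRange 0 ((m+1 : Nat) : Int) 1
        = PySem.List.pyRange 0 (m : Int) 1 ++ [(m : Int)] := by
      push_cast
      exact PySem.List.pyRange_one_succ_right (by positivity)
    rw [hrange, List.foldl_append, ih hm']
    have htake : l.take (m+2) = l.take (m+1) ++ [l[m+1]] := by
      rw [List.take_add_one, List.getElem?_eq_getElem hm1lt]
      rfl
    have hsnoc : pvChunks sep (l.take (m+2)) = pvCstep sep c l[m+1] := by
      rw [htake, pvChunks_snoc, hc]
    have hget1 : PySem.List.pyGetD l ((m : Nat) : Int) (0,0,0) = l[m] := by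
      simp [PySem.List.pyGetD_natCast, List.getD_eq_getElem?_getD, List.getElem?_eq_getElem hmlt]
    have hget2 : PySem.List.pyGetD l ((m : Nat) + 1 : Int) (0,0,0) = l[m+1] := by
      have h12 : ((m : Nat) : Int) + 1 = (((m + 1 : Nat)) : Int) := by push_cast; ring
      rw [h12, PySem.List.pyGetD_natCast, List.getD_eq_getElem?_getD,
        List.getElem?_eq_getElem hm1lt]
      rfl
    simp only [List.foldl_cons, List.foldl_nil, hget1, hget2]
    rw [hsnoc]
    unfold pvCstep
    rw [hlast]
    simp only []
    split_ifs with hg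
    · -- gap: new chunk closed
      have hslice : PySem.List.slice l (some ((a : Nat) : Int)) (some (((m:Nat) : Int) + 1)) = c.2 := by
        have : ((m : Nat) : Int) + 1 = ((m+1 : Nat) : Int) := by push_cast; ring
        rw [this, PySem.List.slice_natCast, hopen]
      rw [hslice]
      have hfl : (c.1 ++ [c.2]).flatten.length = m + 1 := by
        simp only [List.flatten_append, List.flatten_cons, List.flatten_nil, List.append_nil,
          List.length_append]
        omega
      simp only [Prod.mk.injEq]
      refine ⟨by trivial, ?_⟩
      rw [hfl]
      push_cast
      ring
    · rfl

theorem pvA_split (sep : Int) (l : List (Int×Int×Int)) :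
    (let st := (PySem.List.pyRange 0 ((l.length : Int) - 1) 1).foldl
      (fun (st : List (List (Int×Int×Int)) × Int) i =>
        if |(PySem.List.pyGetD l i (0,0,0)).2.1 - (PySem.List.pyGetD l (i+1) (0,0,0)).2.1| > sep
        then (st.1 ++ [PySem.List.slice l (some st.2) (some (i+1))], i + 1)
        else st) ([], 0);
     st.1 ++ [PySem.List.slice l (some st.2) none])
    = (pvChunks sep l).1 ++ [(pvChunks sep l).2] := by
  cases hl : l with
  | nil =>
    rw [PySem.List.pyRange_one_eq_nil (by norm_num)]
    simp [pvChunks, PySem.List.slice_some_none]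
  | cons p t =>
    rw [← hl]
    have hne : l ≠ [] := by rw [hl]; simp
    have hlen : 1 ≤ l.length := by rw [hl]; simp
    have hcast : ((l.length : Int) - 1) = ((l.length - 1 : Nat) : Int) := by omega
    rw [hcast, pvA_loop sep l (l.length - 1) (by omega)]
    have htake : l.take ((l.length - 1) + 1) = l := by
      rw [Nat.sub_add_cancel hlen, List.take_length]
    rw [htake]
    have hF1 := pvChunks_flatten sep l
    have hdrop : PySem.List.slice l (some ((pvChunks sep l).1.flatten.length : Int)) none
        = (pvChunks sep l).2 := by
      rw [PySem.List.slice_from_natCast]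
      nth_rewrite 2 [← hF1]
      exact List.drop_left
    simp only [hdrop]

def pvTagsL (s : Int) (bs : List (List (Int×Int×Int))) : List (Int × (Int×Int×Int)) :=
  (PySem.List.enumerate bs s).flatMap (fun ic => ic.2.map (fun p => (ic.1, p)))

theorem pvEnumerate_snoc {α : Type} (xs : List α) (x : α) (s : Int) :
    PySem.List.enumerate (xs ++ [x]) s = PySem.List.enumerate xs s ++ [(s + xs.length, x)] := by
  induction xs generalizing s with
  | nil => simp [PySem.List.enumerate_cons, PySem.List.enumerate_nil]
  | cons y ys ih =>
    simp only [List.cons_append, PySem.List.enumerate_cons, ih, List.length_cons]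
    push_cast
    ring_nf

theorem pvTagsL_snoc (s : Int) (bs : List (List (Int×Int×Int))) (b : List (Int×Int×Int)) :
    pvTagsL s (bs ++ [b]) = pvTagsL s bs ++ b.map (fun p => (s + bs.length, p)) := by
  simp [pvTagsL, pvEnumerate_snoc]

theorem pvB_loop (sep : Int) (l : List (Int×Int×Int)) :
    l.foldl (fun (st : List (Int × (Int×Int×Int)) × Int × Option Int) p =>
      let row := match st.2.2 with
        | some py => if |py - p.2.1| > sep then st.2.1 + 1 else st.2.1
        | none => st.2.1
      (st.1 ++ [(row, p)], row, some p.2.1)) ([], 0, none)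
    = (pvTagsL 0 ((pvChunks sep l).1 ++ [(pvChunks sep l).2]),
       ((pvChunks sep l).1.length : Int),
       l.getLast?.map (fun p => p.2.1)) := by
  induction l using List.reverseRecOn with
  | nil => simp [pvChunks, pvTagsL, PySem.List.enumerate_cons, PySem.List.enumerate_nil]
  | append_singleton l p ih =>
    rw [List.foldl_append, ih]
    simp only [List.foldl_cons, List.foldl_nil]
    cases hL : l.getLast? with
    | none =>
      have hl : l = [] := List.getLast?_eq_none_iff.mp hL
      subst hl
      simp [pvChunks, pvCstep, pvTagsL, PySem.List.enumerate_cons, PySem.List.enumerate_nil]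
    | some q =>
      have hgl : (pvChunks sep l).2.getLast? = some q := by
        rw [pvChunks_open_getLast?, hL]
      rw [pvChunks_snoc]
      unfold pvCstep
      rw [hgl]
      simp only [Option.map_some]
      split_ifs with hg
      · refine Prod.ext ?_ (Prod.ext ?_ (by simp)) <;> simp only []
        · rw [pvTagsL_snoc, pvTagsL_snoc, pvTagsL_snoc]
          simp [List.length_append]
        · simp [List.length_append]
      · refine Prod.ext ?_ (Prod.ext ?_ (by simp)) <;> simp only []
        rw [pvTagsL_snoc, pvTagsL_snoc, List.map_append, ← List.append_assoc]
        simp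

def pvLt (a b : Int × (Int×Int×Int)) : Bool :=
  decide (a.1 < b.1) || (!decide (b.1 < a.1) && decide (a.2.1 < b.2.1))

theorem pvSorted2_eq (xs : List (Int × (Int×Int×Int))) :
    PySem.List.sorted2 xs (fun t => t.1) (fun t => t.2.1) false
    = xs.foldl (fun acc x => PySem.List.insertBy pvLt x acc) [] := rfl

theorem pvInsertBy_cons {α : Type} (before : α → α → Bool) (x y : α) (ys : List α) :
    PySem.List.insertBy before x (y :: ys)
    = if before x y then x :: y :: ys else y :: PySem.List.insertBy before x ys := by
  simp [PySem.List.insertBy]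

theorem pvInsertBy_append {α : Type} (before : α → α → Bool) (x : α) (P Q : List α)
    (h : ∀ y ∈ P, before x y = false) :
    PySem.List.insertBy before x (P ++ Q) = P ++ PySem.List.insertBy before x Q := by
  induction P with
  | nil => rfl
  | cons y P ih =>
    simp only [List.cons_append, pvInsertBy_cons, h y (by simp)]
    simp only [Bool.false_eq_true, if_false]
    rw [ih (fun z hz => h z (by simp [hz]))]

theorem pvFoldIns_append {α : Type} (before : α → α → Bool) (R P Q : List α)
    (h : ∀ x ∈ R, ∀ y ∈ P, before x y = false) :
    R.foldl (fun acc x => PySem.List.insertBy before x acc) (P ++ Q)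
    = P ++ R.foldl (fun acc x => PySem.List.insertBy before x acc) Q := by
  induction R generalizing Q with
  | nil => rfl
  | cons x R ih =>
    simp only [List.foldl_cons]
    rw [pvInsertBy_append before x P Q (h x (by simp)),
      ih _ (fun z hz y hy => h z (by simp [hz]) y hy)]

theorem pvInsertBy_map (s : Int) (p : Int×Int×Int) (ys : List (Int×Int×Int)) :
    PySem.List.insertBy pvLt (s, p) (ys.map (fun r => (s, r)))
    = (PySem.List.insertBy (fun a b : Int×Int×Int => decide (a.1 < b.1)) p ys).map
        (fun r => (s, r)) := by
  induction ys with
  | nil => rfl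
  | cons y ys ih =>
    simp only [List.map_cons, pvInsertBy_cons, pvLt]
    simp only [lt_self_iff_false, decide_false, Bool.false_or, Bool.not_false, Bool.true_and]
    split_ifs with h
    · simp
    · simp [ih]

theorem pvFoldIns_map (s : Int) (b : List (Int×Int×Int)) (acc : List (Int×Int×Int)) :
    (b.map (fun r => (s, r))).foldl (fun acc x => PySem.List.insertBy pvLt x acc)
      (acc.map (fun r => (s, r)))
    = (b.foldl (fun acc x =>
        PySem.List.insertBy (fun a b : Int×Int×Int => decide (a.1 < b.1)) x acc) acc).map
        (fun r => (s, r)) := by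
  induction b generalizing acc with
  | nil => rfl
  | cons x b ih =>
    simp only [List.map_cons, List.foldl_cons, pvInsertBy_map, ih]

theorem pvSortTag (s : Int) (b : List (Int×Int×Int)) :
    (b.map (fun r => (s, r))).foldl (fun acc x => PySem.List.insertBy pvLt x acc) []
    = (PySem.List.sorted b (fun x => x.1) false).map (fun r => (s, r)) := by
  rw [PySem.List.sorted_eq_foldl_insertBy]
  simpa using pvFoldIns_map s b []

theorem pvTagsL_cons (s : Int) (b : List (Int×Int×Int)) (bs : List (List (Int×Int×Int))) :
    pvTagsL s (b :: bs) = b.map (fun p => (s, p)) ++ pvTagsL (s+1) bs := by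
  simp [pvTagsL, PySem.List.enumerate_cons]

theorem pvTagsL_mem_fst (bs : List (List (Int×Int×Int))) (s : Int) (x : Int × (Int×Int×Int))
    (hx : x ∈ pvTagsL s bs) : s ≤ x.1 := by
  induction bs generalizing s with
  | nil => simp [pvTagsL, PySem.List.enumerate_nil] at hx
  | cons b bs ih =>
    rw [pvTagsL_cons] at hx
    rcases List.mem_append.mp hx with h | h
    · obtain ⟨r, _, rfl⟩ := List.mem_map.mp h
      simp
    · have := ih (s+1) h
      omega

theorem pvSorted_tags (bs : List (List (Int×Int×Int))) (s : Int) :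
    (pvTagsL s bs).foldl (fun acc x => PySem.List.insertBy pvLt x acc) []
    = (PySem.List.enumerate bs s).flatMap
        (fun ic => (PySem.List.sorted ic.2 (fun x => x.1) false).map (fun p => (ic.1, p))) := by
  induction bs generalizing s with
  | nil => simp [pvTagsL, PySem.List.enumerate_nil]
  | cons b bs ih =>
    rw [pvTagsL_cons, List.foldl_append, pvSortTag]
    have hdom : ∀ x ∈ pvTagsL (s+1) bs,
        ∀ y ∈ (PySem.List.sorted b (fun x => x.1) false).map (fun r => (s, r)),
        pvLt x y = false := by
      intro x hx y hy
      obtain ⟨r, _, rfl⟩ := List.mem_map.mp hy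
      have hs := pvTagsL_mem_fst bs (s+1) x hx
      simp only [pvLt]
      have h1 : ¬ (x.1 < s) := by omega
      have h2 : s < x.1 := by omega
      simp [h1, h2]
    have := pvFoldIns_append pvLt (pvTagsL (s+1) bs)
      ((PySem.List.sorted b (fun x => x.1) false).map (fun r => (s, r))) [] hdom
    simp only [List.append_nil] at this
    rw [this, ih]
    simp [PySem.List.enumerate_cons]

theorem pvNested_foldl {α β : Type} (bs : List (List α)) (g : β → α → β) (init : β) :
    bs.foldl (fun st row => row.foldl g st) init = bs.flatten.foldl g init := by
  exact List.foldl_flatten.symm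

theorem pvEnumerate_map {α β : Type} (f : α → β) (xs : List α) (s : Int) :
    PySem.List.enumerate (xs.map f) s
    = (PySem.List.enumerate xs s).map (fun ip => (ip.1, f ip.2)) := by
  induction xs generalizing s with
  | nil => simp [PySem.List.enumerate_nil]
  | cons x xs ih => simp [PySem.List.enumerate_cons, ih]

theorem pvCounterFold {α : Type} (dstep : PySem.Dict Int (Int×Int×Int) → Int → α → PySem.Dict Int (Int×Int×Int))
    (ws : List α) (d : PySem.Dict Int (Int×Int×Int)) (cnt : Int) :
    ws.foldl (fun st p => (dstep st.1 st.2 p, st.2 + 1)) (d, cnt)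
    = ((PySem.List.enumerate ws cnt).foldl (fun d ip => dstep d ip.1 ip.2) d,
       cnt + ws.length) := by
  induction ws generalizing d cnt with
  | nil => simp [PySem.List.enumerate_nil]
  | cons x ws ih =>
    simp only [List.foldl_cons, PySem.List.enumerate_cons, ih]
    refine Prod.ext rfl ?_
    simp only [List.length_cons]
    push_cast
    ring

theorem pvFlatMap_proj (bs : List (List (Int×Int×Int))) (s : Int) :
    ((PySem.List.enumerate bs s).flatMap
        (fun ic => (PySem.List.sorted ic.2 (fun x => x.1) false).map (fun p => (ic.1, p)))).map
      (fun t => t.2)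
    = (bs.map (fun b => PySem.List.sorted b (fun x => x.1) false)).flatten := by
  induction bs generalizing s with
  | nil => simp [PySem.List.enumerate_nil]
  | cons b bs ih => simp [PySem.List.enumerate_cons, ih]

def pvDstep (key : String) (d : PySem.Dict Int (Int×Int×Int)) (c : Int) (p : Int×Int×Int) :
    PySem.Dict Int (Int×Int×Int) :=
  let d1 := if key == "page_id" then d.insert c p else d
  if key == "bus_id" then d1.insert p.2.2 p else d1

theorem pvEnumFold_proj (Z : List (Int × (Int×Int×Int)))
    (h : PySem.Dict Int (Int×Int×Int) → Int → (Int×Int×Int) → PySem.Dict Int (Int×Int×Int)) :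
    (PySem.List.enumerate Z 0).foldl (fun d ct => h d ct.1 ct.2.2) PySem.Dict.empty
    = (PySem.List.enumerate (Z.map (fun t => t.2)) 0).foldl
        (fun d ip => h d ip.1 ip.2) PySem.Dict.empty := by
  rw [pvEnumerate_map, List.foldl_map]

theorem pvMain (key : String) (sep : Int) (l : List (Int×Int×Int)) :
    (let st := (PySem.List.pyRange 0 ((l.length : Int) - 1) 1).foldl
      (fun (st : List (List (Int×Int×Int)) × Int) i =>
        if |(PySem.List.pyGetD l i (0,0,0)).2.1 - (PySem.List.pyGetD l (i+1) (0,0,0)).2.1| > sep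
        then (st.1 ++ [PySem.List.slice l (some st.2) (some (i+1))], i + 1)
        else st) ([], 0)
     let split := st.1 ++ [PySem.List.slice l (some st.2) none]
     let split := split.map (fun r => PySem.List.sorted r (fun x => x.1) false)
     let fin := split.foldl
       (fun (st : PySem.Dict Int (Int×Int×Int) × Int) row =>
         row.foldl (fun (st : PySem.Dict Int (Int×Int×Int) × Int) point =>
           let d1 := if key == "page_id" then st.1.insert st.2 point else st.1
           let d2 := if key == "bus_id" then d1.insert point.2.2 point else d1
           (d2, st.2 + 1)) st) (PySem.Dict.empty, 0)
     fin.1.items)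
    = (let tg := l.foldl
        (fun (st : List (Int × (Int×Int×Int)) × Int × Option Int) p =>
          let row := match st.2.2 with
            | some py => if |py - p.2.1| > sep then st.2.1 + 1 else st.2.1
            | none => st.2.1
          (st.1 ++ [(row, p)], row, some p.2.1)) ([], 0, none)
       let tagged := PySem.List.sorted2 tg.1 (fun t => t.1) (fun t => t.2.1) false
       ((PySem.List.enumerate tagged).foldl
         (fun (d : PySem.Dict Int (Int×Int×Int)) ct =>
           let d1 := if key == "page_id" then d.insert ct.1 ct.2.2 else d
           if key == "bus_id" then d1.insert ct.2.2.2.2 ct.2.2 else d1)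
         PySem.Dict.empty).items) := by
  have hA := pvA_split sep l
  have hB := pvB_loop sep l
  simp only [] at hA ⊢
  rw [hA, hB]
  have eA : (fun (st : PySem.Dict Int (Int×Int×Int) × Int) (point : Int×Int×Int) =>
      let d1 := if key == "page_id" then st.1.insert st.2 point else st.1
      let d2 := if key == "bus_id" then d1.insert point.2.2 point else d1
      (d2, st.2 + 1))
      = fun st p => (pvDstep key st.1 st.2 p, st.2 + 1) := rfl
  have eB : (fun (d : PySem.Dict Int (Int×Int×Int)) (ct : Int × (Int × (Int×Int×Int))) =>
      let d1 := if key == "page_id" then d.insert ct.1 ct.2.2 else d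
      if key == "bus_id" then d1.insert ct.2.2.2.2 ct.2.2 else d1)
      = fun d ct => pvDstep key d ct.1 ct.2.2 := rfl
  rw [eA, eB, pvNested_foldl, pvCounterFold, pvSorted2_eq, pvSorted_tags, pvEnumFold_proj,
    pvFlatMap_proj]

-- ===== VERDICT (by name: the statement is the Claim_ definition above) =====
theorem page_label_spec : Claim_equal_page_label := by
  intro points key sep _
  show page_label points key sep = page_label_alt points key sep
  unfold page_label page_label_alt
  exact pvMain key sep (PySem.List.sorted points (fun x => x.2.1) true)
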